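-- pv_equiv track=rewrite | github.com/Yavmarto/Shared-files-from-Ariap-Wars | PCG in Python/general_map_methods.py | fuse_map
-- ===== SOURCE A (Python) =====
-- def fuse_map(target_map, source_map):
--     for i in range(len(source_map)):
--         if i == 0 or i % 3 == 0:
--             for j in range(len(target_map)):
--                 if (j == 0 or j % 3 == 0) and source_map[i] == target_map[j]:
--                     target_map[j] = source_map[i]
--                     target_map[j+1] = source_map[i+1]
--                     target_map[j+2] = source_map[i+2]
--
--     return target_map
-- ===== SOURCE B (Python) =====
-- def fuse_map(target_map, source_map):
--     # Build an index of source keys (positions 0,3,6,...); later duplicates win,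
--     # then one indexed pass over the target triples.  Mutates target_map in place
--     # like the original.
--     idx = {}
--     for i in range(0, len(source_map), 3):
--         idx[source_map[i]] = i
--     for j in range(0, len(target_map), 3):
--         i = idx.get(target_map[j])
--         if i is not None:
--             target_map[j + 1] = source_map[i + 1]
--             target_map[j + 2] = source_map[i + 2]
--     return target_map
-- ===== Notes on version B (the rewrite author's own statement) =====
-- stated objective: faster
-- what changed: Replaces the source-outer/target-inner nested scan by a single dict from source key to its index (last occurrence wins) followed by one indexed pass over the target triples; intended as faster (O(n*m) to O(n+m)).
import Mathlib
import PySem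

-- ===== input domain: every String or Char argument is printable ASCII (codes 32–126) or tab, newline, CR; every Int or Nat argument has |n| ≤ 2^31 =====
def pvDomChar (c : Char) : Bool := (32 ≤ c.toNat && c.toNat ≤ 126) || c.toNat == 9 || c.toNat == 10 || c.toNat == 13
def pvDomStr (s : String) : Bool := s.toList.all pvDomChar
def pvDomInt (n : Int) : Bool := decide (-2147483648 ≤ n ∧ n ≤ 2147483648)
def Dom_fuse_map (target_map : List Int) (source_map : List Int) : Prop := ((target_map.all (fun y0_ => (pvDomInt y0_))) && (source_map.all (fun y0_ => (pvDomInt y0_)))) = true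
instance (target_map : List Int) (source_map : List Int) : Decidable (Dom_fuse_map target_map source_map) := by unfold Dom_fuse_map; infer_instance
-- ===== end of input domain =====

-- B replaces A's source-outer/target-inner nested scan by a dict from source key to its
-- index (last occurrence wins) plus one indexed pass over the target triples (intended as
-- faster).
-- In Python both A and B mutate target_map in place; the equivalence proved here is
-- about the returned value.

-- ===== PORT A =====
def fuse_map (target_map : List Int) (source_map : List Int) : List Int :=
  (PySem.List.pyRange 0 (source_map.length : Int) 1).foldl (fun tm i =>
    if i == 0 || i % 3 == 0 then
      (PySem.List.pyRange 0 (tm.length : Int) 1).foldl (fun tm j =>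
        if (j == 0 || j % 3 == 0) && (PySem.List.pyGetD source_map i 0 == PySem.List.pyGetD tm j 0) then
          PySem.List.pySetD
            (PySem.List.pySetD
              (PySem.List.pySetD tm j (PySem.List.pyGetD source_map i 0))
              (j + 1) (PySem.List.pyGetD source_map (i + 1) 0))
            (j + 2) (PySem.List.pyGetD source_map (i + 2) 0)
        else tm) tm
    else tm) target_map

-- ===== PORT B =====
def fuse_map_alt (target_map : List Int) (source_map : List Int) : List Int :=
  let idx : PySem.Dict Int Int :=
    (PySem.List.pyRange 0 (source_map.length : Int) 3).foldl
      (fun d i => d.insert (PySem.List.pyGetD source_map i 0) i) PySem.Dict.empty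
  (PySem.List.pyRange 0 (target_map.length : Int) 3).foldl (fun tm j =>
    match idx.get? (PySem.List.pyGetD tm j 0) with
    | some i =>
        PySem.List.pySetD
          (PySem.List.pySetD tm (j + 1) (PySem.List.pyGetD source_map (i + 1) 0))
          (j + 2) (PySem.List.pyGetD source_map (i + 2) 0)
    | none => tm) target_map

-- ===== PRECONDITION & SPEC =====
-- Pre_ excludes exactly the inputs on which the Python A raises IndexError: a key of a
-- trailing partial triple (of source or target) matching a key position of the other list.
def Pre_fuse_map (target_map : List Int) (source_map : List Int) : Prop :=
  ∀ i < source_map.length, ∀ j < target_map.length,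
    i % 3 = 0 → j % 3 = 0 → source_map.getD i 0 = target_map.getD j 0 →
      i + 2 < source_map.length ∧ j + 2 < target_map.length
instance (target_map : List Int) (source_map : List Int) : Decidable (Pre_fuse_map target_map source_map) := by
  unfold Pre_fuse_map
  exact Nat.decidableBallLT _ _
def pvWitness_fuse_map : List Int × List Int := ([1, 10, 11], [1, 2, 3])
def Spec_fuse_map (target_map : List Int) (source_map : List Int) (out : List Int) : Prop := out = fuse_map_alt target_map source_map
instance (target_map : List Int) (source_map : List Int) (out : List Int) : Decidable (Spec_fuse_map target_map source_map out) := by unfold Spec_fuse_map; infer_instance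

-- ===== CLAIM (what is proved, stated in full; the proofs are below) =====
def Claim_equal_fuse_map : Prop := ∀ (target_map : List Int) (source_map : List Int), Dom_fuse_map target_map source_map → Pre_fuse_map target_map source_map → Spec_fuse_map target_map source_map (fuse_map target_map source_map)

-- ===== LEMMAS AND PROOFS =====

-- key indices 0, 3, 6, … below n
def kIdx (n : Nat) : List Nat := (List.range n).filter (fun k => k % 3 == 0)

-- one triple update: overwrite positions j+1, j+2 from source triple i (if any)
def updT (s tm : List Int) (j : Nat) : Option Nat → List Int
  | some i => (tm.set (j + 1) (s.getD (i + 1) 0)).set (j + 2) (s.getD (i + 2) 0)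
  | none => tm

-- one pass over the target triples, choosing the source triple by h on the key
def runT (s : List Int) (h : Int → Option Nat) (t : List Int) : List Int :=
  (kIdx t.length).foldl (fun tm j => updT s tm j (h (tm.getD j 0))) t

-- the choice function of one of A's outer iterations
def hA (s : List Int) (i : Nat) (k : Int) : Option Nat := if s.getD i 0 = k then some i else none

-- last source key-index in l whose key equals k
def lastH (s : List Int) (l : List Nat) (k : Int) : Option Nat :=
  (l.filter (fun i => s.getD i 0 == k)).getLast?

theorem mem_kIdx {n j : Nat} : j ∈ kIdx n ↔ j < n ∧ j % 3 = 0 := by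
  simp [kIdx, List.mem_filter, List.mem_range]

theorem nodup_kIdx (n : Nat) : (kIdx n).Nodup := (List.nodup_range).filter _

theorem set_getD_self (tm : List Int) (j : Nat) : tm.set j (tm.getD j 0) = tm := by
  by_cases h : j < tm.length
  · rw [List.getD_eq_getElem tm 0 h, List.set_getElem_self]
  · rw [List.set_eq_of_length_le (by omega)]

theorem getD_set (tm : List Int) (p m : Nat) (v : Int) :
    (tm.set p v).getD m 0 = if m = p ∧ m < tm.length then v else tm.getD m 0 := by
  simp only [List.getD_eq_getElem?_getD, List.getElem?_set]
  split_ifs with h1 h2 h3 <;> simp_all <;> omega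

theorem length_updT (s tm : List Int) (j : Nat) (o : Option Nat) :
    (updT s tm j o).length = tm.length := by
  cases o <;> simp [updT]

theorem getD_updT (s tm : List Int) (j : Nat) (o : Option Nat) (m : Nat) :
    (updT s tm j o).getD m 0 =
      match o with
      | some i =>
          if m = j + 1 ∧ m < tm.length then s.getD (i + 1) 0
          else if m = j + 2 ∧ m < tm.length then s.getD (i + 2) 0
          else tm.getD m 0
      | none => tm.getD m 0 := by
  cases o with
  | none => rfl
  | some i =>
    simp only [updT, getD_set, List.length_set]
    split_ifs <;> simp_all

theorem foldl_char (s : List Int) (h : Int → Option Nat) (l : List Nat)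
    (hl : ∀ j ∈ l, j % 3 = 0) (hnd : l.Nodup) (tm : List Int) (m : Nat) :
    (l.foldl (fun tm j => updT s tm j (h (tm.getD j 0))) tm).getD m 0 =
      if m % 3 ≠ 0 ∧ m < tm.length ∧ (m - m % 3) ∈ l then
        match h (tm.getD (m - m % 3) 0) with
        | some i => s.getD (i + m % 3) 0
        | none => tm.getD m 0
      else tm.getD m 0 := by
  induction l generalizing tm with
  | nil => simp
  | cons j l ih =>
    have hj3 : j % 3 = 0 := hl j (List.mem_cons_self)
    have hjl : j ∉ l := (List.nodup_cons.mp hnd).1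
    set tm1 := updT s tm j (h (tm.getD j 0)) with htm1
    have hlen1 : tm1.length = tm.length := length_updT s tm j _
    have hkey : ∀ p, p % 3 = 0 → tm1.getD p 0 = tm.getD p 0 := by
      intro p hp
      rw [htm1, getD_updT]
      cases h (tm.getD j 0) with
      | none => rfl
      | some i =>
        dsimp only
        rw [if_neg (by intro hh; omega), if_neg (by intro hh; omega)]
    rw [List.foldl_cons, ih (fun x hx => hl x (List.mem_cons_of_mem _ hx)) (List.nodup_cons.mp hnd).2 tm1]
    by_cases hm3 : m % 3 = 0
    · have c1 : ¬ (m % 3 ≠ 0 ∧ m < tm1.length ∧ (m - m % 3) ∈ l) := fun hh => hh.1 hm3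
      have c2 : ¬ (m % 3 ≠ 0 ∧ m < tm.length ∧ (m - m % 3) ∈ (j :: l)) := fun hh => hh.1 hm3
      rw [if_neg c1, if_neg c2, hkey m hm3]
    · have hbase3 : (m - m % 3) % 3 = 0 := by omega
      by_cases hmlen : m < tm.length
      · by_cases hbl : (m - m % 3) ∈ l
        · have hjb : j ≠ m - m % 3 := fun hh => hjl (hh ▸ hbl)
          have h1 : tm1.getD (m - m % 3) 0 = tm.getD (m - m % 3) 0 := hkey _ hbase3
          have h2 : tm1.getD m 0 = tm.getD m 0 := by
            rw [htm1, getD_updT]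
            cases h (tm.getD j 0) with
            | none => rfl
            | some i =>
              dsimp only
              rw [if_neg (by intro hh; omega), if_neg (by intro hh; omega)]
          rw [if_pos ⟨hm3, by omega, hbl⟩,
              if_pos ⟨hm3, hmlen, List.mem_cons_of_mem _ hbl⟩, h1, h2]
        · by_cases hbj : m - m % 3 = j
          · have hmem : (m - m % 3) ∈ (j :: l) := by rw [hbj]; exact List.mem_cons_self
            have c1 : ¬ (m % 3 ≠ 0 ∧ m < tm1.length ∧ (m - m % 3) ∈ l) := fun hh => hbl hh.2.2
            rw [if_neg c1, if_pos ⟨hm3, hmlen, hmem⟩, htm1, getD_updT, ← hbj]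
            cases hc : h (tm.getD (m - m % 3) 0) with
            | none => rfl
            | some i =>
              dsimp only
              rcases (by omega : m % 3 = 1 ∨ m % 3 = 2) with h1 | h1
              · rw [if_pos ⟨by omega, hmlen⟩, h1]
              · rw [if_neg (by intro hh; omega), if_pos ⟨by omega, hmlen⟩, h1]
          · have c1 : ¬ (m % 3 ≠ 0 ∧ m < tm1.length ∧ (m - m % 3) ∈ l) := fun hh => hbl hh.2.2
            have c2 : ¬ (m % 3 ≠ 0 ∧ m < tm.length ∧ (m - m % 3) ∈ (j :: l)) := by
              intro hh
              rcases List.mem_cons.mp hh.2.2 with h' | h'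
              · exact hbj h'
              · exact hbl h'
            rw [if_neg c1, if_neg c2, htm1, getD_updT]
            cases h (tm.getD j 0) with
            | none => rfl
            | some i =>
              dsimp only
              rw [if_neg (by intro hh; omega), if_neg (by intro hh; omega)]
      · have c1 : ¬ (m % 3 ≠ 0 ∧ m < tm1.length ∧ (m - m % 3) ∈ l) := by intro hh; omega
        have c2 : ¬ (m % 3 ≠ 0 ∧ m < tm.length ∧ (m - m % 3) ∈ (j :: l)) := by intro hh; omega
        rw [if_neg c1, if_neg c2, htm1, getD_updT]
        cases h (tm.getD j 0) with
        | none => rfl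
        | some i =>
          dsimp only
          rw [if_neg (by intro hh; omega), if_neg (by intro hh; omega)]

theorem length_foldl_updT (s : List Int) (h : Int → Option Nat) (l : List Nat) (tm : List Int) :
    (l.foldl (fun tm j => updT s tm j (h (tm.getD j 0))) tm).length = tm.length := by
  induction l generalizing tm with
  | nil => rfl
  | cons j l ih => rw [List.foldl_cons, ih, length_updT]

theorem length_runT (s : List Int) (h : Int → Option Nat) (t : List Int) :
    (runT s h t).length = t.length := length_foldl_updT s h _ t

theorem runT_getD (s : List Int) (h : Int → Option Nat) (t : List Int) (m : Nat) :
    (runT s h t).getD m 0 =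
      if m % 3 ≠ 0 ∧ m < t.length then
        match h (t.getD (m - m % 3) 0) with
        | some i => s.getD (i + m % 3) 0
        | none => t.getD m 0
      else t.getD m 0 := by
  unfold runT
  rw [foldl_char s h (kIdx t.length) (fun j hj => (mem_kIdx.mp hj).2) (nodup_kIdx _) t m]
  by_cases hc : m % 3 ≠ 0 ∧ m < t.length
  · rw [if_pos ⟨hc.1, hc.2, mem_kIdx.mpr ⟨by omega, by omega⟩⟩, if_pos hc]
  · rw [if_neg (by intro hh; exact hc ⟨hh.1, hh.2.1⟩), if_neg hc]

theorem eq_of_getD (a b : List Int) (hlen : a.length = b.length)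
    (h : ∀ m, a.getD m 0 = b.getD m 0) : a = b := by
  apply List.ext_getElem hlen
  intro i h1 h2
  have := h i
  rwa [List.getD_eq_getElem a 0 h1, List.getD_eq_getElem b 0 h2] at this

theorem foldl_id (l : List Nat) (tm : List Int) : l.foldl (fun a _ => a) tm = tm := by
  induction l with
  | nil => rfl
  | cons j l ih => rw [List.foldl_cons]; exact ih

theorem runT_none (s t : List Int) : runT s (fun _ => none) t = t := foldl_id _ t

theorem runT_runT (s : List Int) (h1 h2 : Int → Option Nat) (t : List Int) :
    runT s h2 (runT s h1 t) = runT s (fun k => (h2 k).or (h1 k)) t := by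
  apply eq_of_getD
  · rw [length_runT, length_runT, length_runT]
  intro m
  by_cases hc : m % 3 ≠ 0 ∧ m < t.length
  · have hbase : (runT s h1 t).getD (m - m % 3) 0 = t.getD (m - m % 3) 0 := by
      rw [runT_getD]
      rw [if_neg (by intro hh; omega)]
    rw [runT_getD s h2 (runT s h1 t) m, length_runT, if_pos hc, hbase,
        runT_getD s (fun k => (h2 k).or (h1 k)) t m, if_pos hc]
    cases h2 (t.getD (m - m % 3) 0) with
    | some i => rfl
    | none =>
      dsimp only [Option.or]
      rw [runT_getD s h1 t m, if_pos hc]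
  · rw [runT_getD s h2 (runT s h1 t) m, length_runT, if_neg hc, runT_getD s h1 t m, if_neg hc,
        runT_getD s (fun k => (h2 k).or (h1 k)) t m, if_neg hc]

theorem lastH_append (s : List Int) (l : List Nat) (i : Nat) (k : Int) :
    lastH s (l ++ [i]) k = (hA s i k).or (lastH s l k) := by
  unfold lastH hA
  rw [List.filter_append]
  by_cases h : s.getD i 0 = k <;> simp [h]

theorem foldA_char (s t : List Int) (l : List Nat) :
    l.foldl (fun tm i => runT s (hA s i) tm) t = runT s (lastH s l) t := by
  induction l using List.reverseRecOn with
  | nil => exact (runT_none s t).symm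
  | append_singleton l i ih =>
    rw [List.foldl_append, List.foldl_cons, List.foldl_nil, ih, runT_runT]
    have : lastH s (l ++ [i]) = fun k => (hA s i k).or (lastH s l k) := funext (lastH_append s l i)
    rw [this]

theorem dict_char (s : List Int) (l : List Nat) (k : Int) :
    (l.foldl (fun d i => d.insert (s.getD i 0) ((i : Int))) PySem.Dict.empty).get? k
      = (lastH s l k).map (fun (i : Nat) => (i : Int)) := by
  induction l using List.reverseRecOn with
  | nil => rfl
  | append_singleton l i ih =>
    rw [List.foldl_append, List.foldl_cons, List.foldl_nil, PySem.Dict.get?_insert, ih,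
        lastH_append]
    unfold hA
    by_cases h : s.getD i 0 = k
    · rw [if_pos h.symm, if_pos h]
      rfl
    · rw [if_neg (fun hh => h hh.symm), if_neg h]
      rfl

theorem guardInt (k : Nat) : ((k : Int) == 0 || (k : Int) % 3 == 0) = (k % 3 == 0) := by
  rw [Bool.eq_iff_iff]
  simp only [Bool.or_eq_true, beq_iff_eq]
  omega

theorem pyGetD_cast1 (xs : List Int) (k : Nat) (d : Int) :
    PySem.List.pyGetD xs ((k : Int) + 1) d = xs.getD (k + 1) d := by
  have h : ((k : Int) + 1) = ((k + 1 : Nat) : Int) := by push_cast; ring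
  rw [h, PySem.List.pyGetD_natCast]

theorem pyGetD_cast2 (xs : List Int) (k : Nat) (d : Int) :
    PySem.List.pyGetD xs ((k : Int) + 2) d = xs.getD (k + 2) d := by
  have h : ((k : Int) + 2) = ((k + 2 : Nat) : Int) := by push_cast; ring
  rw [h, PySem.List.pyGetD_natCast]

theorem pySetD_cast1 (xs : List Int) (k : Nat) (v : Int) :
    PySem.List.pySetD xs ((k : Int) + 1) v = xs.set (k + 1) v := by
  have h : ((k : Int) + 1) = ((k + 1 : Nat) : Int) := by push_cast; ring
  rw [h, PySem.List.pySetD_natCast]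

theorem pySetD_cast2 (xs : List Int) (k : Nat) (v : Int) :
    PySem.List.pySetD xs ((k : Int) + 2) v = xs.set (k + 2) v := by
  have h : ((k : Int) + 2) = ((k + 2 : Nat) : Int) := by push_cast; ring
  rw [h, PySem.List.pySetD_natCast]

theorem foldl_guard (n : Nat) (f : List Int → Nat → List Int) (init : List Int) :
    (List.range n).foldl (fun a k => if k % 3 == 0 then f a k else a) init
      = (kIdx n).foldl f init := (List.foldl_filter).symm

theorem filter_range_mod3 (n : Nat) :
    kIdx n = (List.range ((n + 2) / 3)).map (fun k => 3 * k) := by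
  induction n with
  | zero => rfl
  | succ n ih =>
    unfold kIdx at *
    rw [List.range_succ, List.filter_append]
    by_cases h : n % 3 = 0
    · have h1 : (n + 1 + 2) / 3 = (n + 2) / 3 + 1 := by omega
      have h2 : 3 * ((n + 2) / 3) = n := by omega
      rw [h1, List.range_succ, List.map_append, ← ih]
      simp [h, h2]
    · have h1 : (n + 1 + 2) / 3 = (n + 2) / 3 := by omega
      rw [h1, ← ih]
      simp [h]

theorem pyRange3 (n : Nat) :
    PySem.List.pyRange 0 (n : Int) 3 = (kIdx n).map (fun (k : Nat) => (k : Int)) := by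
  rw [PySem.List.pyRange_of_pos 0 n (by norm_num), filter_range_mod3, List.map_map]
  have hc : (if (0:Int) < n then (((n:Int) - 0 + 3 - 1) / 3).toNat else 0) = (n + 2) / 3 := by
    split_ifs with h <;> omega
  rw [hc]
  apply List.map_congr_left
  intro k _
  simp

theorem innerA_eq (s : List Int) (k : Nat) (tm : List Int) :
    ((PySem.List.pyRange 0 (tm.length : Int) 1).foldl (fun tm j =>
        if (j == 0 || j % 3 == 0) && (PySem.List.pyGetD s (k : Int) 0 == PySem.List.pyGetD tm j 0) then
          PySem.List.pySetD
            (PySem.List.pySetD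
              (PySem.List.pySetD tm j (PySem.List.pyGetD s (k : Int) 0))
              (j + 1) (PySem.List.pyGetD s ((k : Int) + 1) 0))
            (j + 2) (PySem.List.pyGetD s ((k : Int) + 2) 0)
        else tm) tm)
      = runT s (hA s k) tm := by
  rw [PySem.List.pyRange_zero_natCast, List.foldl_map]
  have hsplit : ∀ (a : List Int) (j : Nat),
      (if ((j : Int) == 0 || (j : Int) % 3 == 0) && (PySem.List.pyGetD s (k : Int) 0 == PySem.List.pyGetD a (j : Int) 0) then
          PySem.List.pySetD
            (PySem.List.pySetD
              (PySem.List.pySetD a (j : Int) (PySem.List.pyGetD s (k : Int) 0))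
              ((j : Int) + 1) (PySem.List.pyGetD s ((k : Int) + 1) 0))
            ((j : Int) + 2) (PySem.List.pyGetD s ((k : Int) + 2) 0)
        else a)
      = (if (j % 3 == 0) then updT s a j (hA s k (a.getD j 0)) else a) := by
    intro a j
    rw [guardInt]
    by_cases h3 : (j % 3 == 0) = true
    · rw [h3]
      simp only [Bool.true_and, if_true]
      rw [PySem.List.pyGetD_natCast, PySem.List.pyGetD_natCast, pyGetD_cast1, pyGetD_cast2,
          PySem.List.pySetD_natCast, pySetD_cast1, pySetD_cast2]
      unfold hA
      by_cases h : s.getD k 0 = a.getD j 0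
      · rw [if_pos (by exact beq_iff_eq.mpr h), if_pos h, h, set_getD_self]
        rfl
      · rw [if_neg (show ¬(s.getD k 0 == a.getD j 0) = true from fun hh => h (beq_iff_eq.mp hh)),
            if_neg h]
        rfl
    · have hf : (j % 3 == 0) = false := Bool.eq_false_iff.mpr h3
      rw [if_neg (by rw [hf]; simp), if_neg h3]
  calc (List.range tm.length).foldl (fun a (j : Nat) =>
          (if ((j : Int) == 0 || (j : Int) % 3 == 0) && (PySem.List.pyGetD s (k : Int) 0 == PySem.List.pyGetD a ((j : Nat) : Int) 0) then
              PySem.List.pySetD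
                (PySem.List.pySetD
                  (PySem.List.pySetD a ((j : Nat) : Int) (PySem.List.pyGetD s (k : Int) 0))
                  (((j : Nat) : Int) + 1) (PySem.List.pyGetD s ((k : Int) + 1) 0))
                (((j : Nat) : Int) + 2) (PySem.List.pyGetD s ((k : Int) + 2) 0)
            else a)) tm
      = (List.range tm.length).foldl (fun a (j : Nat) =>
          if (j % 3 == 0) then updT s a j (hA s k (a.getD j 0)) else a) tm := by
        exact List.foldl_ext _ _ _ (fun a j _ => hsplit a j)
    _ = runT s (hA s k) tm := by
        rw [foldl_guard tm.length (fun a j => updT s a j (hA s k (a.getD j 0))) tm]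
        rfl

theorem normA (t s : List Int) :
    fuse_map t s = (kIdx s.length).foldl (fun tm i => runT s (hA s i) tm) t := by
  unfold fuse_map
  rw [PySem.List.pyRange_zero_natCast, List.foldl_map]
  have hstep : ∀ (a : List Int) (k : Nat),
      (if ((k : Int) == 0 || (k : Int) % 3 == 0) then
          (PySem.List.pyRange 0 (a.length : Int) 1).foldl (fun tm j =>
            if (j == 0 || j % 3 == 0) && (PySem.List.pyGetD s (k : Int) 0 == PySem.List.pyGetD tm j 0) then
              PySem.List.pySetD
                (PySem.List.pySetD
                  (PySem.List.pySetD tm j (PySem.List.pyGetD s (k : Int) 0))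
                  (j + 1) (PySem.List.pyGetD s ((k : Int) + 1) 0))
                (j + 2) (PySem.List.pyGetD s ((k : Int) + 2) 0)
            else tm) a
        else a)
      = (if (k % 3 == 0) then runT s (hA s k) a else a) := by
    intro a k
    rw [guardInt]
    by_cases h3 : (k % 3 == 0) = true
    · rw [if_pos h3, if_pos h3, innerA_eq]
    · rw [if_neg h3, if_neg h3]
  rw [← foldl_guard s.length (fun a k => runT s (hA s k) a) t]
  exact List.foldl_ext _ _ _ (fun a k _ => hstep a k)

theorem normB (t s : List Int) :
    fuse_map_alt t s = runT s (lastH s (kIdx s.length)) t := by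
  unfold fuse_map_alt
  have hdict : (PySem.List.pyRange 0 (s.length : Int) 3).foldl
      (fun d i => d.insert (PySem.List.pyGetD s i 0) i) PySem.Dict.empty
      = (kIdx s.length).foldl (fun d (i : Nat) => d.insert (s.getD i 0) ((i : Int))) PySem.Dict.empty := by
    rw [pyRange3, List.foldl_map]
    exact List.foldl_ext _ _ _ (fun d i _ => by rw [PySem.List.pyGetD_natCast])
  rw [hdict, pyRange3, List.foldl_map]
  have hstep : ∀ (a : List Int) (j : Nat),
      (match ((kIdx s.length).foldl (fun d (i : Nat) => d.insert (s.getD i 0) ((i : Int))) PySem.Dict.empty).get?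
          (PySem.List.pyGetD a (j : Int) 0) with
        | some i =>
            PySem.List.pySetD
              (PySem.List.pySetD a ((j : Int) + 1) (PySem.List.pyGetD s (i + 1) 0))
              ((j : Int) + 2) (PySem.List.pyGetD s (i + 2) 0)
        | none => a)
      = updT s a j (lastH s (kIdx s.length) (a.getD j 0)) := by
    intro a j
    rw [PySem.List.pyGetD_natCast, dict_char]
    cases lastH s (kIdx s.length) (a.getD j 0) with
    | none => rfl
    | some i =>
      dsimp only [Option.map]
      rw [pySetD_cast1, pySetD_cast2, pyGetD_cast1, pyGetD_cast2]
      rfl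
  rw [show runT s (lastH s (kIdx s.length)) t
        = (kIdx t.length).foldl (fun a j => updT s a j (lastH s (kIdx s.length) (a.getD j 0))) t from rfl]
  exact List.foldl_ext _ _ _ (fun a j _ => hstep a j)

-- ===== VERDICT (by name: the statement is the Claim_ definition above) =====
theorem fuse_map_spec : Claim_equal_fuse_map := by
  intro t s _ _
  unfold Spec_fuse_map
  rw [normA, normB, foldA_char]
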